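-- pv_equiv track=rewrite | github.com/witoong623/Soft-Actor-Critic | common/buffer.py | range_wrapped
-- ===== SOURCE A (Python) =====
-- def range_wrapped(start, end, length):
--     if start < end:
--         return list(range(start, end))
--
--     i = start
--     values = []
--     while i != end:
--         values.append(i)
--         i = (i + 1) % length
--
--     return values
-- ===== SOURCE B (Python) =====
-- def range_wrapped(start, end, length):
--     if start == end:
--         return []
--     if start < end:
--         return list(range(start, end))
--     return list(range(start, length)) + list(range(0, end))
-- ===== Notes on version B (the rewrite author's own statement) =====
-- stated objective: simpler
-- what changed: Replaced the element-by-element modulo while-loop with two closed-form range constructions (range(start,length)+range(0,end)) plus an explicit start==end empty case.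
-- outside the precondition, e.g. on range_wrapped(5, 2, 4): A returns [5], B returns [0, 1]; on range_wrapped(4, 2, 4): A returns [4, 1], B returns [0, 1]; on range_wrapped(2, -1, -3): A returns [2, 0, -2], B returns []
import Mathlib
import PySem

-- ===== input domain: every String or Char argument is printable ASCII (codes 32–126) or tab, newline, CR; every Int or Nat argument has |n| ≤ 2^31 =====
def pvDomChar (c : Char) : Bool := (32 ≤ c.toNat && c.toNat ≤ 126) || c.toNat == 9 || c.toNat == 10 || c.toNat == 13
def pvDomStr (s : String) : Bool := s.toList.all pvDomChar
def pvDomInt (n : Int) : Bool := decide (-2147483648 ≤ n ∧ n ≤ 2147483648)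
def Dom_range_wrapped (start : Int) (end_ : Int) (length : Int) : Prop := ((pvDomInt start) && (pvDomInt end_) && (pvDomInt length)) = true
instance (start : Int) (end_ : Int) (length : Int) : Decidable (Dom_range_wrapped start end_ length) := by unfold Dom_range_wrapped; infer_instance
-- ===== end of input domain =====

-- B replaces A's element-by-element modulo while-loop with two closed-form range
-- constructions (simpler); equivalence is claimed on in-range circular-buffer indices (Pre_).

-- ===== PORT A =====
-- the while-loop of A, with fuel only to make it total; inside Pre_ the fuel never runs out
def rwLoop : Nat → Int → Int → Int → List Int → List Int
  | 0, _, _, _, values => values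
  | fuel + 1, i, end_, length, values =>
    if i ≠ end_ then
      rwLoop fuel (PySem.Int.mod (i + 1) length) end_ length (values ++ [i])
    else values

def range_wrapped (start : Int) (end_ : Int) (length : Int) : List Int :=
  if start < end_ then PySem.List.pyRange start end_ 1
  else rwLoop (length.natAbs + (start - end_).natAbs + 1) start end_ length []

-- ===== PORT B =====
def range_wrapped_alt (start : Int) (end_ : Int) (length : Int) : List Int :=
  if start = end_ then []
  else if start < end_ then PySem.List.pyRange start end_ 1
  else PySem.List.pyRange start length 1 ++ PySem.List.pyRange 0 end_ 1

-- ===== PRECONDITION & SPEC =====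
-- Pre_ excludes out-of-range circular indices (end_ < 0, or start ≥ length in the wrap case),
-- where A either loops forever (e.g. non-positive length) or returns values containing the
-- unreduced start index, an artefact outside the buffer's natural index domain [0, length).
def Pre_range_wrapped (start : Int) (end_ : Int) (length : Int) : Prop :=
  start < end_ ∨ start = end_ ∨ (0 ≤ end_ ∧ end_ < start ∧ start < length)
instance (start : Int) (end_ : Int) (length : Int) : Decidable (Pre_range_wrapped start end_ length) := by
  unfold Pre_range_wrapped; infer_instance

def pvWitness_range_wrapped : Int × Int × Int := (5, 2, 7)

def Spec_range_wrapped (start : Int) (end_ : Int) (length : Int) (out : List Int) : Prop :=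
  out = range_wrapped_alt start end_ length
instance (start : Int) (end_ : Int) (length : Int) (out : List Int) : Decidable (Spec_range_wrapped start end_ length out) := by
  unfold Spec_range_wrapped; infer_instance

-- ===== CLAIM (what is proved, stated in full; the proofs are below) =====
def Claim_equal_range_wrapped : Prop := ∀ (start : Int) (end_ : Int) (length : Int), Dom_range_wrapped start end_ length → Pre_range_wrapped start end_ length → Spec_range_wrapped start end_ length (range_wrapped start end_ length)

-- ===== LEMMAS AND PROOFS =====

-- the loop in its final phase: i has wrapped to [0, end_]
theorem rwLoop_low (end_ length : Int) :
    ∀ (fuel : Nat) (i : Int) (values : List Int), 0 ≤ i → i ≤ end_ → end_ < length →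
    (end_ - i).toNat ≤ fuel →
    rwLoop fuel i end_ length values = values ++ PySem.List.pyRange i end_ 1 := by
  intro fuel
  induction fuel with
  | zero =>
    intro i values h0 hie hel hf
    have : i = end_ := by omega
    subst this
    simp [rwLoop, PySem.List.pyRange_one_eq_nil le_rfl]
  | succ n ih =>
    intro i values h0 hie hel hf
    by_cases hieq : i = end_
    · subst hieq
      simp [rwLoop, PySem.List.pyRange_one_eq_nil le_rfl]
    · have hlt : i < end_ := lt_of_le_of_ne hie hieq
      have hmod : PySem.Int.mod (i + 1) length = i + 1 := by
        rw [PySem.Int.mod_eq_emod_of_pos (by omega)]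
        exact Int.emod_eq_of_lt (by omega) (by omega)
      simp only [rwLoop, if_pos hieq, hmod]
      rw [ih (i + 1) (values ++ [i]) (by omega) (by omega) hel (by omega)]
      rw [PySem.List.pyRange_one_cons hlt]
      simp

-- the loop in its first phase: end_ < i < length; it runs up to length - 1, wraps to 0,
-- then finishes via rwLoop_low
theorem rwLoop_high (end_ length : Int) :
    ∀ (fuel : Nat) (i : Int) (values : List Int), 0 ≤ end_ → end_ < i → i < length →
    ((length - i) + end_).toNat ≤ fuel →
    rwLoop fuel i end_ length values =
      values ++ PySem.List.pyRange i length 1 ++ PySem.List.pyRange 0 end_ 1 := by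
  intro fuel
  induction fuel with
  | zero =>
    intro i values h0 hei hil hf
    omega
  | succ n ih =>
    intro i values h0 hei hil hf
    have hieq : i ≠ end_ := by omega
    by_cases hnext : i + 1 < length
    · have hmod : PySem.Int.mod (i + 1) length = i + 1 := by
        rw [PySem.Int.mod_eq_emod_of_pos (by omega)]
        exact Int.emod_eq_of_lt (by omega) (by omega)
      simp only [rwLoop, if_pos hieq, hmod]
      rw [ih (i + 1) (values ++ [i]) h0 (by omega) hnext (by omega)]
      rw [PySem.List.pyRange_one_cons (show i < length by omega)]
      simp
    · have hl : i + 1 = length := by omega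
      have hmod : PySem.Int.mod (i + 1) length = 0 := by
        rw [hl, PySem.Int.mod_eq_emod_of_pos (by omega)]
        exact Int.emod_self
      simp only [rwLoop, if_pos hieq, hmod]
      rw [rwLoop_low end_ length n 0 (values ++ [i]) le_rfl h0 (by omega) (by omega)]
      have hsing : PySem.List.pyRange i length 1 = [i] := by
        rw [← hl]; exact PySem.List.pyRange_one_singleton i
      simp [hsing]

-- ===== VERDICT (by name: the statement is the Claim_ definition above) =====
theorem range_wrapped_spec : Claim_equal_range_wrapped := by
  intro start end_ length _ hpre
  unfold Spec_range_wrapped range_wrapped range_wrapped_alt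
  rcases hpre with hlt | heq | ⟨h0, hes, hsl⟩
  · rw [if_pos hlt, if_neg (by omega), if_pos hlt]
  · subst heq
    rw [if_neg (by omega), if_pos rfl]
    simp [rwLoop]
  · rw [if_neg (by omega), if_neg (by omega), if_neg (by omega)]
    rw [rwLoop_high end_ length _ start [] h0 hes hsl (by omega)]
    simp
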